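-- pv_equiv track=rewrite | github.com/James-Oswald/IEEE-Professional-Development-Night | 1-25-21/upsideDown.py | isUpsidedown
-- ===== SOURCE A (Python) =====
-- opp = {
--     "0" : "0",
--     "1" : "1",
--     "2" : None,
--     "3" : None,
--     "4" : None,
--     "5" : None,
--     "6" : "9",
--     "7" : None,
--     "8" : "8",
--     "9" : "6",
-- }
--
-- def isUpsidedown(num):
--     num = str(num)
--     if len(num) % 2 == 0:
--         for index in range(len(num) // 2):
--             if opp[num[index]] == None or num[index] != opp[num[-(index + 1)]]:
--                 return False
--         return True
--     else:
--         center = len(num) // 2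
--         if opp[num[center]] != num[center]:
--             return False
--         for index in range(len(num) // 2):
--             if opp[num[index]] == None or num[index] != opp[num[-(index + 1)]]:
--                 return False
--         return True
-- ===== SOURCE B (Python) =====
-- opp = {
--     "0" : "0",
--     "1" : "1",
--     "2" : None,
--     "3" : None,
--     "4" : None,
--     "5" : None,
--     "6" : "9",
--     "7" : None,
--     "8" : "8",
--     "9" : "6",
-- }
--
-- def isUpsidedown(num):
--     num = str(num)
--     rotated = []
--     for c in reversed(num):
--         d = opp.get(c)
--         if d is None:
--             return False
--         rotated.append(d)
--     return "".join(rotated) == num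
-- ===== Notes on version B (the rewrite author's own statement) =====
-- stated objective: simpler
-- what changed: B builds the full half-turn-rotated digit string in one reversed pass with opp.get and compares it to the original, replacing A's mirrored two-index check duplicated across an even/odd-length split with an explicit center test.
import Mathlib
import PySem

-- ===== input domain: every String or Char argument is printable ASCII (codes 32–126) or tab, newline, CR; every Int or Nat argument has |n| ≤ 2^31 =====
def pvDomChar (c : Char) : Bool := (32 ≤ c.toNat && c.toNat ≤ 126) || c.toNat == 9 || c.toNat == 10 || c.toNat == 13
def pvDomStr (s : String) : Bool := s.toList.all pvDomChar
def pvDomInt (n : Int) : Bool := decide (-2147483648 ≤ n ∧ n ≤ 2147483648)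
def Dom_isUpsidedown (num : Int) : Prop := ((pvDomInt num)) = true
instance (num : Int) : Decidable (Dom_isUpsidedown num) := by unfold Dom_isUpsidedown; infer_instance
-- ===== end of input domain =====

-- B builds the full 180°-rotated string in one reversed pass and compares it to the
-- original, instead of A's mirrored two-pointer index check with an even/odd split:
-- objective 'simpler' (same linear cost).

-- ===== PORT A =====
-- the `opp` dict lookup: some d = the flip digit, none = Python's None on digits 2,3,4,5,7.
-- On non-digit chars Python A raises KeyError; inside Pre_ A's control flow never looks
-- up a non-digit char, so `none` for non-keys is never reached inside Pre_.
def oppF (c : Char) : Option Char :=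
  if c = '0' then some '0'
  else if c = '1' then some '1'
  else if c = '6' then some '9'
  else if c = '8' then some '8'
  else if c = '9' then some '6'
  else none

-- A's loop condition; inside Pre_ indices i and n-1-i (Python's -(index+1)) are in range,
-- so `getD` is exact.
def pvCondA (s : List Char) (i : Nat) : Bool :=
  oppF (s.getD i ' ') == none || !(some (s.getD i ' ') == oppF (s.getD (s.length - 1 - i) ' '))

-- A's `for index in range(...)` with early `return False`
def pvForA (s : List Char) : List Nat → Bool
  | [] => true
  | i :: rest => if pvCondA s i then false else pvForA s rest

def isUpsidedown (num : Int) : Bool :=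
  let s := PySem.Int.toChars num
  let n := s.length
  if n % 2 = 0 then
    pvForA s (List.range (n / 2))
  else
    let center := n / 2
    if !(oppF (s.getD center ' ') == some (s.getD center ' ')) then false
    else pvForA s (List.range (n / 2))

-- ===== PORT B =====
-- B's loop over reversed(num): opp.get(c) is exactly oppF (missing key ↦ None ↦ none);
-- early `return False` on none, else append the flipped digit.
def pvBGo : List Char → List Char → Option (List Char)
  | [], acc => some acc
  | c :: rest, acc =>
    match oppF c with
    | none => none
    | some d => pvBGo rest (acc ++ [d])

def isUpsidedown_alt (num : Int) : Bool :=
  let s := PySem.Int.toChars num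
  match pvBGo s.reverse [] with
  | none => false
  | some rotated => rotated == s

-- ===== PRECONDITION & SPEC =====
-- Pre_ excludes exactly the inputs on which Python A raises KeyError('-'): negatives with
-- an even digit count, or whose center digit is its own upside-down image (the center check passes and the
-- mirror loop then looks up the '-' sign); on every other negative A's center check
-- fails first and A returns False, so those stay inside Pre_.
def Pre_isUpsidedown (num : Int) : Prop :=
  0 ≤ num ∨
    ((PySem.Int.toChars num).length % 2 = 1 ∧
      (PySem.Int.toChars num).getD ((PySem.Int.toChars num).length / 2) ' ' ∉
        (['0', '1', '8'] : List Char))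
instance (num : Int) : Decidable (Pre_isUpsidedown num) := by unfold Pre_isUpsidedown; infer_instance
def pvWitness_isUpsidedown : Int := 69

def Spec_isUpsidedown (num : Int) (out : Bool) : Prop := out = isUpsidedown_alt num
instance (num : Int) (out : Bool) : Decidable (Spec_isUpsidedown num out) := by unfold Spec_isUpsidedown; infer_instance

-- ===== CLAIM (what is proved, stated in full; the proofs are below) =====
def Claim_equal_isUpsidedown : Prop := ∀ (num : Int), Dom_isUpsidedown num → Pre_isUpsidedown num → Spec_isUpsidedown num (isUpsidedown num)

-- ===== LEMMAS AND PROOFS =====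

-- oppF is an involution where defined
theorem oppF_invol (a b : Char) (h : oppF a = some b) : oppF b = some a := by
  unfold oppF at h ⊢
  split_ifs at h <;> injection h with h <;> subst h <;> subst_vars <;> decide

-- A's early-exit loop is the `all` of the negated condition
theorem pvForA_eq_all (s : List Char) (l : List Nat) :
    pvForA s l = l.all (fun i => !pvCondA s i) := by
  induction l with
  | nil => rfl
  | cons i r ih =>
    simp only [pvForA, List.all_cons]
    cases h : pvCondA s i <;> simp [ih]

-- B's accumulator loop in closed form
theorem pvBGo_eq (l acc : List Char) :
    pvBGo l acc =
      if l.all (fun c => (oppF c).isSome) then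
        some (acc ++ l.map (fun c => (oppF c).getD ' '))
      else none := by
  induction l generalizing acc with
  | nil => simp [pvBGo]
  | cons c r ih =>
    cases h : oppF c with
    | none => simp [pvBGo, h]
    | some d =>
      simp only [pvBGo, h, ih, List.all_cons, Option.isSome_some, Bool.true_and,
        List.map_cons, Option.getD_some]
      split_ifs <;> simp

-- the common characterisation: the 180° rotation fixes s pointwise
def pvP (s : List Char) : Prop :=
  ∀ j < s.length, oppF (s.getD (s.length - 1 - j) ' ') = some (s.getD j ' ')

theorem B_iff (s : List Char) :
    (match pvBGo s.reverse [] with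
      | none => false
      | some rotated => (rotated == s : Bool)) = true ↔ pvP s := by
  rw [pvBGo_eq]
  by_cases hall : s.reverse.all (fun c => (oppF c).isSome)
  · rw [if_pos hall]
    simp only [List.nil_append, beq_iff_eq]
    constructor
    · intro hmap j hj
      have hlen : s.length - 1 - j < s.length := by omega
      have h1 : (List.map (fun c => (oppF c).getD ' ') s.reverse)[j]'(by simpa using hj) = s[j] := by
        simp only [hmap]
      rw [List.getElem_map, List.getElem_reverse] at h1
      have hmem : (s[s.length - 1 - j]'(by simpa using hlen)) ∈ s.reverse := by
        rw [List.mem_reverse]; exact List.getElem_mem _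
      have hsome := (List.all_eq_true.mp hall) _ hmem
      rcases Option.isSome_iff_exists.mp hsome with ⟨d, hd⟩
      rw [hd, Option.getD_some] at h1
      simp [List.getD_eq_getElem?_getD, List.getElem?_eq_getElem hj,
        List.getElem?_eq_getElem hlen, hd, h1]
    · intro hp
      apply List.ext_getElem (by simp)
      intro j h1 h2
      have hj : j < s.length := h2
      have hlen : s.length - 1 - j < s.length := by omega
      rw [List.getElem_map, List.getElem_reverse]
      have hpj := hp j hj
      simp only [List.getD_eq_getElem?_getD, List.getElem?_eq_getElem hj,
        List.getElem?_eq_getElem hlen, Option.getD_some] at hpj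
      rw [hpj]
      rfl
  · rw [if_neg hall]
    simp only [Bool.false_eq_true, false_iff]
    intro hp
    apply hall
    rw [List.all_eq_true]
    intro c hc
    rcases List.getElem_of_mem (List.mem_reverse.mp hc) with ⟨i, hi, rfl⟩
    have hpi := hp (s.length - 1 - i) (by omega)
    rw [show s.length - 1 - (s.length - 1 - i) = i by omega] at hpi
    simp only [List.getD_eq_getElem?_getD, List.getElem?_eq_getElem hi,
      Option.getD_some] at hpi
    simp [hpi]

theorem condA_false_iff (s : List Char) (i : Nat) :
    (!pvCondA s i) = true ↔
      oppF (s.getD i ' ') ≠ none ∧ oppF (s.getD (s.length - 1 - i) ' ') = some (s.getD i ' ') := by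
  simp only [pvCondA, Bool.not_eq_true', Bool.or_eq_false_iff, beq_eq_false_iff_ne,
    Bool.not_eq_false', beq_iff_eq]
  constructor
  · rintro ⟨h1, h2⟩; exact ⟨h1, h2.symm⟩
  · rintro ⟨h1, h2⟩; exact ⟨h1, h2.symm⟩

theorem A_iff (s : List Char) :
    (if s.length % 2 = 0 then pvForA s (List.range (s.length / 2))
     else if !(oppF (s.getD (s.length / 2) ' ') == some (s.getD (s.length / 2) ' ')) then false
     else pvForA s (List.range (s.length / 2))) = true ↔ pvP s := by
  have loop_iff : (pvForA s (List.range (s.length / 2)) = true) ↔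
      ∀ i < s.length / 2, oppF (s.getD i ' ') ≠ none ∧
        oppF (s.getD (s.length - 1 - i) ' ') = some (s.getD i ' ') := by
    rw [pvForA_eq_all, List.all_eq_true]
    constructor
    · intro H i hi
      exact (condA_false_iff s i).mp (H _ (List.mem_range.mpr hi))
    · intro H i hi
      exact (condA_false_iff s i).mpr (H _ (List.mem_range.mp hi))
  by_cases hpar : s.length % 2 = 0
  · rw [if_pos hpar, loop_iff]
    constructor
    · intro H j hj
      by_cases hjlt : j < s.length / 2
      · exact (H j hjlt).2
      · have h2 := (H (s.length - 1 - j) (by omega)).2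
        rw [show s.length - 1 - (s.length - 1 - j) = j by omega] at h2
        exact oppF_invol _ _ h2
    · intro hp i hi
      refine ⟨?_, hp i (by omega)⟩
      have h2 := hp (s.length - 1 - i) (by omega)
      rw [show s.length - 1 - (s.length - 1 - i) = i by omega] at h2
      rw [h2]
      simp
  · rw [if_neg hpar]
    by_cases hc : oppF (s.getD (s.length / 2) ' ') = some (s.getD (s.length / 2) ' ')
    · rw [if_neg (show ¬((!(oppF (s.getD (s.length / 2) ' ') ==
          some (s.getD (s.length / 2) ' '))) = true) by
            rw [hc]; simp), loop_iff]
      constructor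
      · intro H j hj
        rcases lt_trichotomy j (s.length / 2) with hjlt | hjeq | hjgt
        · exact (H j hjlt).2
        · subst hjeq
          rw [show s.length - 1 - s.length / 2 = s.length / 2 by omega]
          exact hc
        · have h2 := (H (s.length - 1 - j) (by omega)).2
          rw [show s.length - 1 - (s.length - 1 - j) = j by omega] at h2
          exact oppF_invol _ _ h2
      · intro hp i hi
        refine ⟨?_, hp i (by omega)⟩
        have h2 := hp (s.length - 1 - i) (by omega)
        rw [show s.length - 1 - (s.length - 1 - i) = i by omega] at h2
        rw [h2]
        simp
    · rw [if_pos (by rw [Bool.not_eq_true', beq_eq_false_iff_ne]; exact hc)]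
      simp only [Bool.false_eq_true, false_iff]
      intro hp
      apply hc
      have h2 := hp (s.length / 2) (by omega)
      rw [show s.length - 1 - s.length / 2 = s.length / 2 by omega] at h2
      exact h2

-- ===== VERDICT (by name: the statement is the Claim_ definition above) =====
theorem isUpsidedown_spec : Claim_equal_isUpsidedown := by
  intro num _ _
  unfold Spec_isUpsidedown isUpsidedown isUpsidedown_alt
  rw [Bool.eq_iff_iff]
  exact (A_iff _).trans (B_iff _).symm
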